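-- pv_equiv track=rewrite | github.com/nidinnover-hash/Team-Empire-BOS- | app/engines/brain/drafting.py | route_role
-- ===== SOURCE A (Python) =====
-- ROLE_PROMPTS: dict[str, str] = {
--     "CEO Clone": (
--         "You are Nidin's CEO Clone, his AI chief of staff and thinking partner.\n"
--         "Your job: help Nidin prioritize, decide, delegate, and grow.\n"
--         "Rules:\n"
--         "- For business questions: respond with what the decision is, who should act, and whether approval is needed.\n"
--         "- For personal or conversational messages: respond naturally with warmth and helpfulness.\n"
--         "- When Nidin teaches you something or asks you to remember, acknowledge it and confirm what you learned.\n"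
--         "- Be direct. No fluff. Max 3 bullet points unless asked for more.\n"
--         "- If an action is risky (sending messages, spending money, assigning work), flag it clearly.\n"
--         "- You know Nidin runs a study abroad and recruitment company with about 23 staff.\n"
--         "- Never reject a message as 'not applicable'. Always engage helpfully."
--     ),
--     "Ops Manager Clone": (
--         "You are Nidin's Ops Manager Clone. You manage daily operations and team productivity.\n"
--         "Your job: assign tasks, track blockers, manage daily plans for each team member.\n"
--         "Rules:\n"
--         "- Always respond with a specific task list, who is assigned, and what is blocked.\n"
--         "- Use names and numbers, never be vague.\n"
--         "- If you need to assign something, draft it and flag it for Nidin's approval.\n"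
--         "- Tech team: 1 Tech Head + 4 Developers. Manager: 1. Other teams: counsellors, app management, sub-agents."
--     ),
--     "Sales Lead Clone": (
--         "You are Nidin's Sales Lead Clone. You manage leads and drive conversions.\n"
--         "Your job: summarize lead status, identify who needs follow-up, and draft outreach.\n"
--         "Rules:\n"
--         "- Always respond with lead count, conversion context, and next action per segment.\n"
--         "- Current conversion rate is about 5%. Focus on improving follow-up quality.\n"
--         "- Leads come through social media and manual collection.\n"
--         "- Never send messages without Nidin's approval."
--     ),
--     "Tech PM Clone": (
--         "You are Nidin's Tech PM Clone. You manage the tech team and technical decisions.\n"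
--         "Your job: convert goals into developer tasks, track sprint progress, flag risks.\n"
--         "Rules:\n"
--         "- Always respond with: current task status, next tasks to assign, any blockers.\n"
--         "- Tech team has 1 Tech Head and 4 developers. They currently track work in Excel.\n"
--         "- Prioritize tasks that directly move active projects forward.\n"
--         "- Be specific, give actual task names, not generic descriptions."
--     ),
--     "Strategist": (
--         "You are Nidin's Strategist, his dedicated thinking partner for high-level decisions.\n"
--         "Your job: help Nidin think through business strategy, market moves, competitive positioning, "
--         "growth plans, partnerships, and long-term vision.\n"
--         "Rules:\n"
--         "- Always respond with structured strategic analysis.\n"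
--         "- When a decision is reached, state it clearly as: 'DECISION: <statement>'\n"
--         "- Reference relevant context from past strategy sessions.\n"
--         "- Push back on weak reasoning. Be the devil's advocate when needed.\n"
--         "- Separate strategy from execution, execution belongs to the business agent."
--     ),
-- }
--
-- def route_role(message: str, force_role: str | None = None) -> str:
--     """Pick the right clone role based on message content."""
--     if force_role is not None and force_role in ROLE_PROMPTS:
--         return force_role
--     text = message.lower()
--     if any(token in text for token in ("lead", "follow-up", "conversion", "sales", "prospect")):
--         return "Sales Lead Clone"
--     if any(token in text for token in ("task", "staff", "ops", "daily plan", "team", "productivity")):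
--         return "Ops Manager Clone"
--     if any(token in text for token in ("roadmap", "spec", "bug", "release", "developer", "sprint", "code")):
--         return "Tech PM Clone"
--     return "CEO Clone"
-- ===== SOURCE B (Python) =====
-- ROLE_PROMPTS = {
--     "CEO Clone": "",
--     "Ops Manager Clone": "",
--     "Sales Lead Clone": "",
--     "Tech PM Clone": "",
--     "Strategist": "",
-- }
-- # NOTE: the real module's ROLE_PROMPTS has long prompt values; only its KEYS matter here.
--
-- ROLES = ["Sales Lead Clone", "Ops Manager Clone", "Tech PM Clone", "CEO Clone"]
--
-- TOKEN_PRIORITY = {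
--     "lead": 0, "follow-up": 0, "conversion": 0, "sales": 0, "prospect": 0,
--     "task": 1, "staff": 1, "ops": 1, "daily plan": 1, "team": 1, "productivity": 1,
--     "roadmap": 2, "spec": 2, "bug": 2, "release": 2, "developer": 2, "sprint": 2, "code": 2,
-- }
--
-- def route_role(message, force_role=None):
--     """Pick the right clone role based on message content."""
--     if force_role is not None and force_role in ROLE_PROMPTS:
--         return force_role
--     text = message.lower()
--     best = len(ROLES) - 1  # CEO Clone, the default
--     for token, priority in TOKEN_PRIORITY.items():
--         if priority < best and token in text:
--             best = priority
--     return ROLES[best]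
-- ===== Notes on version B (the rewrite author's own statement) =====
-- stated objective: alternative
-- what changed: Instead of an early-return cascade of ordered keyword-group tests, B scans one flat token-to-priority map and keeps the minimum priority among all matching tokens in an accumulator, then indexes a role table with it.
import Mathlib
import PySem

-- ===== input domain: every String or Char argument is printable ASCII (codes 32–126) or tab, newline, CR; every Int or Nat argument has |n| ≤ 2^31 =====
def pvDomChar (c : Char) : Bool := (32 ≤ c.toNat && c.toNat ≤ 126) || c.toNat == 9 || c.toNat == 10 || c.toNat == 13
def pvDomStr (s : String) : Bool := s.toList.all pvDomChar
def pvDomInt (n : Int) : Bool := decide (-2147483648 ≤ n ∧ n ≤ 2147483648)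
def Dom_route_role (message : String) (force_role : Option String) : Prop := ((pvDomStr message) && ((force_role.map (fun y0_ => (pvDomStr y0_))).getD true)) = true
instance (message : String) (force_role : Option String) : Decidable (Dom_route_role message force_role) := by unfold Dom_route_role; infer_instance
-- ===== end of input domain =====

-- ===== PORT A =====
-- B replaces A's early-return cascade of keyword-group tests by a minimum-priority scan over a flat
-- token→priority map plus a role table lookup (objective: alternative).
def ROLE_PROMPTS : PySem.Dict String String :=
  PySem.Dict.empty
  |>.insert "CEO Clone" "You are Nidin's CEO Clone, his AI chief of staff and thinking partner.\nYour job: help Nidin prioritize, decide, delegate, and grow.\nRules:\n- For business questions: respond with what the decision is, who should act, and whether approval is needed.\n- For personal or conversational messages: respond naturally with warmth and helpfulness.\n- When Nidin teaches you something or asks you to remember, acknowledge it and confirm what you learned.\n- Be direct. No fluff. Max 3 bullet points unless asked for more.\n- If an action is risky (sending messages, spending money, assigning work), flag it clearly.\n- You know Nidin runs a study abroad and recruitment company with about 23 staff.\n- Never reject a message as 'not applicable'. Always engage helpfully."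
  |>.insert "Ops Manager Clone" "You are Nidin's Ops Manager Clone. You manage daily operations and team productivity.\nYour job: assign tasks, track blockers, manage daily plans for each team member.\nRules:\n- Always respond with a specific task list, who is assigned, and what is blocked.\n- Use names and numbers, never be vague.\n- If you need to assign something, draft it and flag it for Nidin's approval.\n- Tech team: 1 Tech Head + 4 Developers. Manager: 1. Other teams: counsellors, app management, sub-agents."
  |>.insert "Sales Lead Clone" "You are Nidin's Sales Lead Clone. You manage leads and drive conversions.\nYour job: summarize lead status, identify who needs follow-up, and draft outreach.\nRules:\n- Always respond with lead count, conversion context, and next action per segment.\n- Current conversion rate is about 5%. Focus on improving follow-up quality.\n- Leads come through social media and manual collection.\n- Never send messages without Nidin's approval."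
  |>.insert "Tech PM Clone" "You are Nidin's Tech PM Clone. You manage the tech team and technical decisions.\nYour job: convert goals into developer tasks, track sprint progress, flag risks.\nRules:\n- Always respond with: current task status, next tasks to assign, any blockers.\n- Tech team has 1 Tech Head and 4 developers. They currently track work in Excel.\n- Prioritize tasks that directly move active projects forward.\n- Be specific, give actual task names, not generic descriptions."
  |>.insert "Strategist" "You are Nidin's Strategist, his dedicated thinking partner for high-level decisions.\nYour job: help Nidin think through business strategy, market moves, competitive positioning, growth plans, partnerships, and long-term vision.\nRules:\n- Always respond with structured strategic analysis.\n- When a decision is reached, state it clearly as: 'DECISION: <statement>'\n- Reference relevant context from past strategy sessions.\n- Push back on weak reasoning. Be the devil's advocate when needed.\n- Separate strategy from execution, execution belongs to the business agent."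

def route_role (message : String) (force_role : Option String) : String :=
  -- if force_role is not None and force_role in ROLE_PROMPTS: return force_role
  match force_role with
  | some r =>
    if ROLE_PROMPTS.contains r then r
    else
      let text := PySem.Str.lower message
      if ["lead", "follow-up", "conversion", "sales", "prospect"].any (fun token => PySem.Str.isIn token text) then "Sales Lead Clone"
      else if ["task", "staff", "ops", "daily plan", "team", "productivity"].any (fun token => PySem.Str.isIn token text) then "Ops Manager Clone"
      else if ["roadmap", "spec", "bug", "release", "developer", "sprint", "code"].any (fun token => PySem.Str.isIn token text) then "Tech PM Clone"
      else "CEO Clone"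
  | none =>
    let text := PySem.Str.lower message
    if ["lead", "follow-up", "conversion", "sales", "prospect"].any (fun token => PySem.Str.isIn token text) then "Sales Lead Clone"
    else if ["task", "staff", "ops", "daily plan", "team", "productivity"].any (fun token => PySem.Str.isIn token text) then "Ops Manager Clone"
    else if ["roadmap", "spec", "bug", "release", "developer", "sprint", "code"].any (fun token => PySem.Str.isIn token text) then "Tech PM Clone"
    else "CEO Clone"

-- ===== PORT B =====
def ROLES : List String := ["Sales Lead Clone", "Ops Manager Clone", "Tech PM Clone", "CEO Clone"]

-- TOKEN_PRIORITY.items(), in insertion order (priorities are small non-negative ints, kept as Nat)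
def TOKEN_PRIORITY : List (String × Nat) :=
  [ ("lead", 0), ("follow-up", 0), ("conversion", 0), ("sales", 0), ("prospect", 0),
    ("task", 1), ("staff", 1), ("ops", 1), ("daily plan", 1), ("team", 1), ("productivity", 1),
    ("roadmap", 2), ("spec", 2), ("bug", 2), ("release", 2), ("developer", 2), ("sprint", 2), ("code", 2) ]

-- the 'for token, priority in TOKEN_PRIORITY.items()' loop of Source B with accumulator `best`
def bestLoop (text : String) (best : Nat) : List (String × Nat) → Nat
  | [] => best
  | (token, priority) :: rest =>
    if priority < best ∧ PySem.Str.isIn token text = true then bestLoop text priority rest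
    else bestLoop text best rest

def route_role_alt (message : String) (force_role : Option String) : String :=
  match force_role with
  | some r =>
    if ROLE_PROMPTS.contains r then r
    else
      -- ROLES[best]: best is always < ROLES.length, so getD is exact for Python's list indexing here
      ROLES.getD (bestLoop (PySem.Str.lower message) (ROLES.length - 1) TOKEN_PRIORITY) ""
  | none =>
    ROLES.getD (bestLoop (PySem.Str.lower message) (ROLES.length - 1) TOKEN_PRIORITY) ""

-- ===== PRECONDITION & SPEC =====
def Spec_route_role (message : String) (force_role : Option String) (out : String) : Prop := out = route_role_alt message force_role
instance (message : String) (force_role : Option String) (out : String) : Decidable (Spec_route_role message force_role out) := by unfold Spec_route_role; infer_instance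

-- ===== CLAIM (what is proved, stated in full; the proofs are below) =====
def Claim_equal_route_role : Prop := ∀ (message : String) (force_role : Option String), Dom_route_role message force_role → Spec_route_role message force_role (route_role message force_role)

-- ===== LEMMAS AND PROOFS =====
-- a whole priority group at the head of the list collapses to one test of its group-any
theorem bestLoop_group (text : String) (best p : Nat) (tokens : List String) (rest : List (String × Nat)) :
    bestLoop text best (tokens.map (fun t => (t, p)) ++ rest) =
      if p < best ∧ tokens.any (fun t => PySem.Str.isIn t text) then bestLoop text p rest
      else bestLoop text best rest := by
  induction tokens generalizing best with
  | nil => simp [bestLoop]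

  | cons t ts ih =>
    simp only [List.map_cons, List.cons_append, bestLoop, List.any_cons, Bool.or_eq_true]
    rw [ih, ih]
    have hpp : ¬(p < p ∧ (ts.any fun t => PySem.Str.isIn t text) = true) := by simp
    split_ifs <;> tauto

theorem TOKEN_PRIORITY_eq :
    TOKEN_PRIORITY =
      (["lead", "follow-up", "conversion", "sales", "prospect"].map (fun t => (t, 0)))
      ++ ((["task", "staff", "ops", "daily plan", "team", "productivity"].map (fun t => (t, 1)))
      ++ ((["roadmap", "spec", "bug", "release", "developer", "sprint", "code"].map (fun t => (t, 2)))
      ++ ([] : List (String × Nat)))) := by rfl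

theorem bestLoop_eval (text : String) :
    ROLES.getD (bestLoop text (ROLES.length - 1) TOKEN_PRIORITY) "" =
      (if ["lead", "follow-up", "conversion", "sales", "prospect"].any (fun token => PySem.Str.isIn token text) then "Sales Lead Clone"
       else if ["task", "staff", "ops", "daily plan", "team", "productivity"].any (fun token => PySem.Str.isIn token text) then "Ops Manager Clone"
       else if ["roadmap", "spec", "bug", "release", "developer", "sprint", "code"].any (fun token => PySem.Str.isIn token text) then "Tech PM Clone"
       else "CEO Clone") := by
  rw [TOKEN_PRIORITY_eq]
  simp only [bestLoop_group]
  split_ifs <;> simp_all [ROLES, bestLoop]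

-- ===== VERDICT (by name: the statement is the Claim_ definition above) =====
theorem route_role_spec : Claim_equal_route_role := by
  intro message force_role _
  unfold Spec_route_role route_role route_role_alt
  cases force_role with
  | none => rw [bestLoop_eval]
  | some r =>
    by_cases h : ROLE_PROMPTS.contains r
    · simp [h]
    · simp only [h, if_false, Bool.false_eq_true]
      rw [bestLoop_eval]
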